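-- pv_equiv track=rewrite | github.com/10XGenomics/cellranger-atac | lib/python/barcodes/__init__.py | query_barcodes_and_gem_groups
-- ===== SOURCE A (Python) =====
-- def query_barcodes_and_gem_groups(valid_barcodes):
--     """Breaks down a list of valid barcode sequences into barcodes - gem group
--     subsequences."""
--     barcode_seqs = {}
--     gem_group_seqs = set()
--
--     for barcode in valid_barcodes:
--         assert '-' in barcode
--         barcode_seq, gem_group = barcode.split('-')
--         gem_group_seqs.add(gem_group)
--         if gem_group not in barcode_seqs:
--             barcode_seqs[gem_group] = set()
--         barcode_seqs[gem_group].add(barcode_seq)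
--
--     gem_group_seqs = sorted(gem_group_seqs)
--     for gem_group in gem_group_seqs:
--         barcode_seqs[gem_group] = sorted(barcode_seqs[gem_group])
--
--     return barcode_seqs, gem_group_seqs
-- ===== SOURCE B (Python) =====
-- def query_barcodes_and_gem_groups(valid_barcodes):
--     """Breaks down a list of valid barcode sequences into barcodes - gem group
--     subsequences."""
--     pairs = []
--     for barcode in valid_barcodes:
--         assert '-' in barcode
--         barcode_seq, gem_group = barcode.split('-')
--         pairs.append((gem_group, barcode_seq))
--
--     # keys in first-appearance order of the gem group, as a dict preserves
--     barcode_seqs = {gem_group: [] for gem_group, _ in pairs}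
--     # sort the distinct pairs once; appending segments them per gem group,
--     # already in sorted order
--     for gem_group, barcode_seq in sorted(set(pairs)):
--         barcode_seqs[gem_group].append(barcode_seq)
--
--     return barcode_seqs, sorted(barcode_seqs)
-- ===== Notes on version B (the rewrite author's own statement) =====
-- stated objective: alternative
-- what changed: A scatters each barcode into a per-gem-group set and then sorts every bucket; B collects (gem_group, seq) pairs, sorts the distinct pairs once, and segments the single sorted list into the per-group lists (keys kept in first-appearance order).
import Mathlib
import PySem

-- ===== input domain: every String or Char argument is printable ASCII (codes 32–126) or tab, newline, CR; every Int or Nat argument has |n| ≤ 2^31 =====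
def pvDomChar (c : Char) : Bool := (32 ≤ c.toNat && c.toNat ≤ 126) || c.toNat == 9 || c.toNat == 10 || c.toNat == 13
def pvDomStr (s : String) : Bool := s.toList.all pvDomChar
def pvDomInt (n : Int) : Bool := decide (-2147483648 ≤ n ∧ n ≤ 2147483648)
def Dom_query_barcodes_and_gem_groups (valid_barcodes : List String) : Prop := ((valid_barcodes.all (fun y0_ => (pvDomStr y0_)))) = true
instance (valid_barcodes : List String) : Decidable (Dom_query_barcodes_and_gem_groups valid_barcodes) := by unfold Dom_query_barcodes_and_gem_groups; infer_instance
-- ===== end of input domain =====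

-- B replaces A's scatter-into-per-group-sets-then-sort-each-bucket by collect-(gem_group, seq)-pairs,
-- sort the distinct pairs once, then segment them per gem group (objective: alternative decomposition).


-- ===== PORT A =====
def query_barcodes_and_gem_groups (valid_barcodes : List String) : (List (String × List String)) × List String :=
  let st := valid_barcodes.foldl
    (fun (st : PySem.Dict String (List String) × PySem.Set String) barcode =>
      if PySem.Str.isIn "-" barcode = true then           -- assert '-' in barcode
        match PySem.Str.split? barcode "-" with
        | some [barcode_seq, gem_group] =>
            let gs := PySem.Set.add st.2 gem_group
            let d := if st.1.contains gem_group then st.1 else st.1.insert gem_group PySem.Set.empty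
            (d.modify gem_group [] (fun s => PySem.Set.add s barcode_seq), gs)
        | _ => st                                         -- Python: ValueError on unpacking (outside Pre_)
      else st                                             -- Python: AssertionError (outside Pre_)
    ) (PySem.Dict.empty, PySem.Set.empty)
  let gem_group_seqs := PySem.List.sorted st.2 (fun x => x) false
  let d := gem_group_seqs.foldl
      (fun d gem_group => d.insert gem_group (PySem.List.sorted (d.getD gem_group []) (fun x => x) false)) st.1
  (d.items, gem_group_seqs)

-- ===== PORT B =====
def query_barcodes_and_gem_groups_alt (valid_barcodes : List String) : (List (String × List String)) × List String :=
  let pairs := valid_barcodes.foldl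
    (fun (acc : List (String × String)) barcode =>
      if PySem.Str.isIn "-" barcode = true then           -- assert '-' in barcode
        match PySem.Str.split? barcode "-" with
        | some parts =>
            match parts with
            | barcode_seq :: gem_group :: [] => acc ++ [(gem_group, barcode_seq)]
            | [] => acc                                   -- Python: ValueError on unpacking (outside Pre_)
            | [_] => acc
            | _ :: _ :: _ :: _ => acc
        | none => acc
      else acc                                            -- Python: AssertionError (outside Pre_)
    ) []
  let d0 : PySem.Dict String (List String) := pairs.foldl
      (fun d p => d.insert p.1 []) PySem.Dict.empty
  let barcode_seqs := (PySem.List.sorted2 (PySem.Set.ofList pairs) (fun p => p.1) (fun p => p.2) false).foldl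
      (fun d p => d.modify p.1 [] (fun l => l ++ [p.2])) d0
  (barcode_seqs.items, PySem.List.sorted barcode_seqs.keys (fun x => x) false)

-- ===== PRECONDITION & SPEC =====
-- Pre_ excludes exactly the inputs where the Python raises: a barcode with no '-'
-- (AssertionError) or more than one '-' (ValueError from the two-name unpack).
def Pre_query_barcodes_and_gem_groups (valid_barcodes : List String) : Prop :=
  ∀ b ∈ valid_barcodes, PySem.Str.count b "-" = 1
instance (valid_barcodes : List String) : Decidable (Pre_query_barcodes_and_gem_groups valid_barcodes) := by unfold Pre_query_barcodes_and_gem_groups; infer_instance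
def pvWitness_query_barcodes_and_gem_groups : List String := ["AAA-1", "TTT-2", "AAA-2", "CCC-1"]

def Spec_query_barcodes_and_gem_groups (valid_barcodes : List String) (out : (List (String × List String)) × List String) : Prop := out = query_barcodes_and_gem_groups_alt valid_barcodes
instance (valid_barcodes : List String) (out : (List (String × List String)) × List String) : Decidable (Spec_query_barcodes_and_gem_groups valid_barcodes out) := by unfold Spec_query_barcodes_and_gem_groups; infer_instance

-- ===== CLAIM (what is proved, stated in full; the proofs are below) =====
def Claim_equal_query_barcodes_and_gem_groups : Prop := ∀ (valid_barcodes : List String), Dom_query_barcodes_and_gem_groups valid_barcodes → Pre_query_barcodes_and_gem_groups valid_barcodes → Spec_query_barcodes_and_gem_groups valid_barcodes (query_barcodes_and_gem_groups valid_barcodes)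

-- ===== LEMMAS AND PROOFS =====

-- The (gem_group, barcode_seq) pair a barcode contributes, none where the Python raises.
def pvStep? (b : String) : Option (String × String) :=
  if PySem.Str.isIn "-" b = true then
    match PySem.Str.split? b "-" with
    | some [s, g] => some (g, s)
    | _ => none
  else none

def pvPairs (bs : List String) : List (String × String) := bs.filterMap pvStep?

-- A's per-pair state update.
def pvStepA (st : PySem.Dict String (List String) × PySem.Set String) (p : String × String) :
    PySem.Dict String (List String) × PySem.Set String :=
  let gs := PySem.Set.add st.2 p.1
  let d := if st.1.contains p.1 then st.1 else st.1.insert p.1 PySem.Set.empty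
  (d.modify p.1 [] (fun s => PySem.Set.add s p.2), gs)

theorem pv_stepA_eq (st : PySem.Dict String (List String) × PySem.Set String) (b : String) :
    (if PySem.Str.isIn "-" b = true then
        match PySem.Str.split? b "-" with
        | some [barcode_seq, gem_group] =>
            let gs := PySem.Set.add st.2 gem_group
            let d := if st.1.contains gem_group then st.1 else st.1.insert gem_group PySem.Set.empty
            (d.modify gem_group [] (fun s => PySem.Set.add s barcode_seq), gs)
        | _ => st
      else st) =
    (match pvStep? b with
     | some p => pvStepA st p
     | none => st) := by
  unfold pvStep? pvStepA
  by_cases h : PySem.Str.isIn "-" b = true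
  · rw [if_pos h, if_pos h]
    rcases hs : PySem.Str.split? b "-" with _ | l
    · rfl
    · rcases l with _ | ⟨s, _ | ⟨g, _ | ⟨x, t⟩⟩⟩ <;> rfl
  · rw [if_neg h, if_neg h]

theorem pv_stepB_eq (acc : List (String × String)) (b : String) :
    (if PySem.Str.isIn "-" b = true then
        match PySem.Str.split? b "-" with
        | some parts =>
            match parts with
            | barcode_seq :: gem_group :: [] => acc ++ [(gem_group, barcode_seq)]
            | [] => acc
            | [_] => acc
            | _ :: _ :: _ :: _ => acc
        | none => acc
      else acc) =
    acc ++ (pvStep? b).toList := by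
  unfold pvStep?
  by_cases h : PySem.Str.isIn "-" b = true
  · rw [if_pos h, if_pos h]
    rcases hs : PySem.Str.split? b "-" with _ | l
    · simp
    · rcases l with _ | ⟨s, _ | ⟨g, _ | ⟨x, t⟩⟩⟩ <;> simp
  · rw [if_neg h, if_neg h]; simp

theorem pv_foldA (bs : List String) (st : PySem.Dict String (List String) × PySem.Set String) :
    bs.foldl
      (fun st barcode =>
        if PySem.Str.isIn "-" barcode = true then
          match PySem.Str.split? barcode "-" with
          | some [barcode_seq, gem_group] =>
              let gs := PySem.Set.add st.2 gem_group
              let d := if st.1.contains gem_group then st.1 else st.1.insert gem_group PySem.Set.empty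
              (d.modify gem_group [] (fun s => PySem.Set.add s barcode_seq), gs)
          | _ => st
        else st) st
    = (pvPairs bs).foldl pvStepA st := by
  induction bs generalizing st with
  | nil => rfl
  | cons b bs ih =>
      rw [List.foldl_cons, pv_stepA_eq st b]
      rcases h : pvStep? b with _ | p
      · simpa [pvPairs, h] using ih st
      · simpa [pvPairs, h] using ih (pvStepA st p)

theorem pv_foldB (bs : List String) (acc : List (String × String)) :
    bs.foldl
      (fun acc barcode =>
        if PySem.Str.isIn "-" barcode = true then
          match PySem.Str.split? barcode "-" with
          | some parts =>
              match parts with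
              | barcode_seq :: gem_group :: [] => acc ++ [(gem_group, barcode_seq)]
              | [] => acc
              | [_] => acc
              | _ :: _ :: _ :: _ => acc
          | none => acc
        else acc) acc
    = acc ++ pvPairs bs := by
  induction bs generalizing acc with
  | nil => simp [pvPairs]
  | cons b bs ih =>
      rw [List.foldl_cons, pv_stepB_eq acc b]
      rcases h : pvStep? b with _ | p
      · simpa [pvPairs, h] using ih acc
      · simpa [pvPairs, h] using ih (acc ++ [p])


theorem pv_stepA_snd (st : PySem.Dict String (List String) × PySem.Set String) (p : String × String) :
    (pvStepA st p).2 = PySem.Set.add st.2 p.1 := rfl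

theorem pv_foldA_snd (P : List (String × String)) (st : PySem.Dict String (List String) × PySem.Set String) :
    (P.foldl pvStepA st).2 = PySem.Set.update st.2 (P.map (fun p => p.1)) := by
  induction P generalizing st with
  | nil => rw [List.foldl_nil, List.map_nil, PySem.Set.update_nil]
  | cons p P ih =>
      rw [List.foldl_cons, ih, pv_stepA_snd, List.map_cons, PySem.Set.update_cons]

theorem pv_stepA_getD (st : PySem.Dict String (List String) × PySem.Set String) (p : String × String) (g : String) :
    (pvStepA st p).1.getD g [] =
      if p.1 = g then PySem.Set.add (st.1.getD g []) p.2 else st.1.getD g [] := by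
  unfold pvStepA
  by_cases hpg : p.1 = g
  · subst hpg
    rw [if_pos rfl]
    by_cases hc : st.1.contains p.1 = true
    · rw [if_pos hc, PySem.Dict.getD_modify_self]
    · rw [if_neg hc, PySem.Dict.getD_modify_self, PySem.Dict.getD_insert_self,
          PySem.Dict.getD_of_not_contains st.1 [] (by simpa using hc)]
      rfl
  · rw [if_neg hpg]
    have hgp : g ≠ p.1 := fun h => hpg h.symm
    by_cases hc : st.1.contains p.1 = true
    · rw [if_pos hc, PySem.Dict.getD_modify_of_ne _ _ _ hgp]
    · rw [if_neg hc, PySem.Dict.getD_modify_of_ne _ _ _ hgp, PySem.Dict.getD_insert_of_ne _ _ _ hgp]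

theorem pv_foldA_getD (P : List (String × String)) (st : PySem.Dict String (List String) × PySem.Set String)
    (g : String) :
    (P.foldl pvStepA st).1.getD g [] =
      PySem.Set.update (st.1.getD g []) ((P.filter (fun p => p.1 == g)).map (fun p => p.2)) := by
  induction P generalizing st with
  | nil => rw [List.foldl_nil, List.filter_nil, List.map_nil, PySem.Set.update_nil]
  | cons p P ih =>
      rw [List.foldl_cons, ih]
      by_cases hpg : p.1 = g
      · rw [List.filter_cons_of_pos (by simpa using hpg), List.map_cons, PySem.Set.update_cons]
        congr 1
        rw [pv_stepA_getD, if_pos hpg]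
      · rw [List.filter_cons_of_neg (by simpa using hpg)]
        congr 1
        rw [pv_stepA_getD, if_neg hpg]

theorem pv_stepA_keys (st : PySem.Dict String (List String) × PySem.Set String) (p : String × String) :
    (pvStepA st p).1.keys = PySem.Set.add st.1.keys p.1 := by
  unfold pvStepA
  by_cases hc : st.1.contains p.1 = true
  · rw [if_pos hc, PySem.Dict.keys_modify, PySem.Dict.keys_insert_of_contains _ _ hc,
        PySem.Set.add_of_mem ((PySem.Dict.contains_iff_mem_keys _ _).mp hc)]
  · rw [if_neg hc, PySem.Dict.keys_modify,
        PySem.Dict.keys_insert_of_contains _ _ (PySem.Dict.contains_insert_self _ _ _),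
        PySem.Dict.keys_insert_of_not_contains _ _ (by simpa using hc),
        PySem.Set.add_of_not_mem
          (fun hm => by simp [(PySem.Dict.contains_iff_mem_keys st.1 p.1).mpr hm] at hc)]

theorem pv_foldA_keys (P : List (String × String)) (st : PySem.Dict String (List String) × PySem.Set String) :
    (P.foldl pvStepA st).1.keys = PySem.Set.update st.1.keys (P.map (fun p => p.1)) := by
  induction P generalizing st with
  | nil => rw [List.foldl_nil, List.map_nil, PySem.Set.update_nil]
  | cons p P ih =>
      rw [List.foldl_cons, ih, pv_stepA_keys, List.map_cons, PySem.Set.update_cons]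

theorem pv_sortFold_getD (l : List String) (d : PySem.Dict String (List String)) (hl : l.Nodup) (g : String) :
    (l.foldl (fun d gg => d.insert gg (PySem.List.sorted (d.getD gg []) (fun x => x) false)) d).getD g []
      = if g ∈ l then PySem.List.sorted (d.getD g []) (fun x => x) false else d.getD g [] := by
  induction l generalizing d with
  | nil => simp
  | cons x l ih =>
      rcases List.nodup_cons.mp hl with ⟨hx, hl'⟩
      rw [List.foldl_cons, ih _ hl']
      by_cases hgx : g = x
      · subst hgx
        rw [if_neg hx, PySem.Dict.getD_insert_self, if_pos List.mem_cons_self]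
      · rw [PySem.Dict.getD_insert_of_ne _ _ _ hgx]
        by_cases hgl : g ∈ l
        · rw [if_pos hgl, if_pos (List.mem_cons_of_mem _ hgl)]
        · rw [if_neg hgl, if_neg (by simp [hgx, hgl])]

theorem pv_d0_getD (P : List (String × String)) (d : PySem.Dict String (List String))
    (h : ∀ g, d.getD g [] = []) (g : String) :
    (P.foldl (fun d p => d.insert p.1 ([] : List String)) d).getD g [] = [] := by
  induction P generalizing d with
  | nil => exact h g
  | cons p P ih =>
      rw [List.foldl_cons]
      refine ih _ (fun g' => ?_)
      by_cases hg : g' = p.1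
      · subst hg; rw [PySem.Dict.getD_insert_self]
      · rw [PySem.Dict.getD_insert_of_ne _ _ _ hg]; exact h g'

theorem pv_update_self (s : PySem.Set String) (xs : List String) (h : ∀ x ∈ xs, x ∈ s) :
    PySem.Set.update s xs = s := by
  rw [PySem.Set.update_eq_append_filter]
  have hnil : (PySem.Set.ofList xs).filter (fun y => !PySem.Set.contains s y) = [] := by
    rw [List.filter_eq_nil_iff]
    intro a ha
    simp
    exact h a ((PySem.Set.mem_ofList _ _).mp ha)
  rw [hnil, List.append_nil]

theorem pv_sorted2_eq (xs : List (String × String)) :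
    PySem.List.sorted2 xs (fun p => p.1) (fun p => p.2) false
      = PySem.List.sorted xs (fun p => (toLex p : Lex (String × String))) false := by
  unfold PySem.List.sorted2 PySem.List.sorted
  simp only [Bool.false_eq_true, if_false]
  congr 1
  funext acc x
  congr 1
  funext a b
  rcases lt_trichotomy a.1 b.1 with h | h | h
  · simp [h, Prod.Lex.lt_iff]
  · simp [h, Prod.Lex.lt_iff]
  · have hh : b.1.toList < a.1.toList := String.lt_iff_toList_lt.mp h
    simp [asymm h, Prod.Lex.lt_iff, hh, ne_of_gt h]

theorem pv_group_sorted (P : List (String × String)) (g : String) :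
    ((PySem.List.sorted2 (PySem.Set.ofList P) (fun p => p.1) (fun p => p.2) false).filter
        (fun p => p.1 == g)).map (fun p => p.2)
      = PySem.List.sorted (PySem.Set.ofList ((P.filter (fun p => p.1 == g)).map (fun p => p.2)))
          (fun x => x) false := by
  rw [pv_sorted2_eq]
  set SP := PySem.List.sorted (PySem.Set.ofList P) (fun p => (toLex p : Lex (String × String))) false with hSP
  have hperm : SP.Perm (PySem.Set.ofList P) := PySem.List.sorted_perm _ _ _
  have hnodupSP : SP.Nodup := hperm.nodup_iff.mpr (PySem.Set.nodup_ofList P)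
  have hmemSP : ∀ p, p ∈ SP ↔ p ∈ P := fun p => hperm.mem_iff.trans (PySem.Set.mem_ofList _ _)
  have hpwle : SP.Pairwise (fun a b => (toLex a : Lex (String × String)) ≤ toLex b) :=
    PySem.List.sorted_pairwise _ _
  have hpwlt : SP.Pairwise (fun a b => (toLex a : Lex (String × String)) < toLex b) :=
    (hpwle.and hnodupSP).imp (fun hab => lt_of_le_of_ne hab.1 (by simpa using hab.2))
  symm
  apply PySem.List.sorted_eq_of_perm_of_pairwise_lt
  · -- permutation
    rw [List.perm_ext_iff_of_nodup ?_ (PySem.Set.nodup_ofList _)]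
    · intro x
      constructor
      · intro hx
        rcases List.mem_map.mp hx with ⟨p, hpf, hpx⟩
        rcases List.mem_filter.mp hpf with ⟨hpSP, hpg⟩
        have hp1 : p.1 = g := by simpa using hpg
        have hpP : p ∈ P := (hmemSP p).mp hpSP
        rw [PySem.Set.mem_ofList]
        exact List.mem_map.mpr ⟨p, List.mem_filter.mpr ⟨hpP, hpg⟩, hpx⟩
      · intro hx
        rcases List.mem_map.mp ((PySem.Set.mem_ofList _ _).mp hx) with ⟨p, hpf, hpx⟩
        rcases List.mem_filter.mp hpf with ⟨hpP, hpg⟩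
        exact List.mem_map.mpr ⟨p, List.mem_filter.mpr ⟨(hmemSP p).mpr hpP, hpg⟩, hpx⟩
    · -- LHS nodup
      refine List.Nodup.map_on ?_ (hnodupSP.filter _)
      intro x hx y hy hxy
      have hx1 : x.1 = g := by simpa using (List.mem_filter.mp hx).2
      have hy1 : y.1 = g := by simpa using (List.mem_filter.mp hy).2
      exact Prod.ext (hx1.trans hy1.symm) hxy
  · -- pairwise <
    rw [List.pairwise_map]
    refine (hpwlt.filter _).imp_of_mem ?_
    intro a b ha hb hab
    have ha1 : a.1 = g := by simpa using (List.mem_filter.mp ha).2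
    have hb1 : b.1 = g := by simpa using (List.mem_filter.mp hb).2
    rcases Prod.Lex.lt_iff.mp hab with h | h
    · exact absurd (ha1.trans hb1.symm) (ne_of_lt (by simpa using h))
    · simpa using h.2


theorem pv_main (P : List (String × String)) :
    (let st := P.foldl pvStepA (PySem.Dict.empty, PySem.Set.empty)
     let ggs := PySem.List.sorted st.2 (fun x => x) false
     let d := ggs.foldl
        (fun d gg => d.insert gg (PySem.List.sorted (d.getD gg []) (fun x => x) false)) st.1
     (d.items, ggs))
    =
    (let d0 : PySem.Dict String (List String) := P.foldl (fun d p => d.insert p.1 []) PySem.Dict.empty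
     let dB := (PySem.List.sorted2 (PySem.Set.ofList P) (fun p => p.1) (fun p => p.2) false).foldl
         (fun d p => d.modify p.1 [] (fun l => l ++ [p.2])) d0
     (dB.items, PySem.List.sorted dB.keys (fun x => x) false)) := by
  set K := PySem.Set.ofList (P.map (fun p => p.1)) with hK
  have hKnodup : K.Nodup := PySem.Set.nodup_ofList _
  set STA := P.foldl pvStepA (PySem.Dict.empty, PySem.Set.empty) with hSTA
  set SP := PySem.List.sorted2 (PySem.Set.ofList P) (fun p => p.1) (fun p => p.2) false with hSPdef
  set D0 : PySem.Dict String (List String) := P.foldl (fun d p => d.insert p.1 []) PySem.Dict.empty with hD0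
  set DB := SP.foldl (fun d p => d.modify p.1 [] (fun l => l ++ [p.2])) D0 with hDB
  set GGS := PySem.List.sorted STA.2 (fun x => x) false with hGGS
  set DA := GGS.foldl
      (fun d gg => d.insert gg (PySem.List.sorted (d.getD gg []) (fun x => x) false)) STA.1 with hDA
  have hsnd : STA.2 = K := by
    rw [hSTA, pv_foldA_snd]
    show PySem.Set.update [] _ = K
    rw [PySem.Set.update_nil_left, hK]
  have hkeysA : STA.1.keys = K := by
    rw [hSTA, pv_foldA_keys, PySem.Dict.keys_empty, PySem.Set.update_nil_left, hK]
  have hgetA : ∀ g, STA.1.getD g [] =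
      PySem.Set.ofList ((P.filter (fun p => p.1 == g)).map (fun p => p.2)) := by
    intro g
    rw [hSTA, pv_foldA_getD]
    show PySem.Set.update (PySem.Dict.empty.getD g []) _ = _
    rw [PySem.Dict.getD_empty, PySem.Set.update_nil_left]
  have hd0keys : D0.keys = K := by
    rw [hD0, PySem.Dict.keys_foldl_insert_key P (fun p => p.1) (fun _ _ => []) PySem.Dict.empty,
        PySem.Dict.keys_empty, PySem.Set.update_nil_left, hK]
  have hd0get : ∀ g, D0.getD g [] = [] := by
    intro g
    rw [hD0]
    exact pv_d0_getD P _ (fun g' => PySem.Dict.getD_empty g' []) g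
  have hSPmem : ∀ p, p ∈ SP → p ∈ P := fun p hp =>
    (PySem.Set.mem_ofList _ _).mp ((PySem.List.sorted2_perm _ _ _ _).mem_iff.mp hp)
  have hdBkeys : DB.keys = K := by
    rw [hDB, PySem.Dict.keys_foldl_modify_key SP (fun p => p.1) [] (fun _ p l => l ++ [p.2]) D0,
        hd0keys]
    apply pv_update_self
    intro x hx
    rcases List.mem_map.mp hx with ⟨p, hpSP, rfl⟩
    exact (PySem.Set.mem_ofList _ _).mpr (List.mem_map_of_mem (hSPmem p hpSP))
  have hdBget : ∀ g, DB.getD g [] = (SP.filter (fun p => p.1 == g)).map (fun p => p.2) := by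
    intro g
    rw [hDB, PySem.Dict.getD_foldl_modify_append SP D0 g, hd0get g, List.nil_append]
  have hggs_mem : ∀ x, x ∈ GGS ↔ x ∈ K := by
    intro x
    rw [hGGS, PySem.List.mem_sorted, hsnd]
  have hggs_nodup : GGS.Nodup := by
    rw [hGGS]
    exact ((PySem.List.sorted_perm STA.2 _ _).nodup_iff).mpr (by rw [hsnd]; exact hKnodup)
  have hdAkeys : DA.keys = K := by
    rw [hDA, PySem.Dict.keys_foldl_insert GGS
          (fun d gg => PySem.List.sorted (d.getD gg []) (fun x => x) false) STA.1, hkeysA]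
    apply pv_update_self
    intro x hx
    exact (hggs_mem x).mp hx
  have hdAget : ∀ g ∈ K, DA.getD g [] = PySem.List.sorted (STA.1.getD g []) (fun x => x) false := by
    intro g hg
    rw [hDA, pv_sortFold_getD GGS STA.1 hggs_nodup g, if_pos ((hggs_mem g).mpr hg)]
  refine Prod.ext ?_ ?_
  · show DA.items = DB.items
    rw [PySem.Dict.items_eq_map_keys DA (by rw [hdAkeys]; exact hKnodup) [],
        PySem.Dict.items_eq_map_keys DB (by rw [hdBkeys]; exact hKnodup) [],
        hdAkeys, hdBkeys]
    apply List.map_congr_left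
    intro g hg
    rw [hdAget g hg, hdBget g, hgetA g, pv_group_sorted P g]
  · show GGS = PySem.List.sorted DB.keys (fun x => x) false
    rw [hGGS, hsnd, hdBkeys]

-- ===== VERDICT (by name: the statement is the Claim_ definition above) =====
theorem query_barcodes_and_gem_groups_spec : Claim_equal_query_barcodes_and_gem_groups := by
  intro bs _ _
  unfold Spec_query_barcodes_and_gem_groups
  unfold query_barcodes_and_gem_groups query_barcodes_and_gem_groups_alt
  simp only [pv_foldA, pv_foldB, List.nil_append]
  exact pv_main (pvPairs bs)
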